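-- pv_equiv track=rewrite | github.com/slovjinika/dec2geez | dec2geez.py | dec2geez
-- ===== SOURCE A (Python) =====
-- digits = {
--     0: "", 1: "፩", 2: "፪", 3: "፫", 4: "፬", 5: "፭",
--     6: "፮", 7: "፯", 8: "፰", 9: "፱", 10: "፲",
--     20: "፳", 30: "፴", 40: "፵", 50: "፶",
--     60: "፷", 70: "፸", 80: "፹", 90: "፺",
--     100: "፻", 10000: "፼"
-- }
--
-- def dec2geez(number):
--     if number < 10:
--         return digits[number]
--
--     if number < 100:
--         tens, ones = divmod(number, 10)
--         return digits[tens * 10] + digits[ones]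
--
--     for divisor, symbol in [(10000, digits[10000]), (100, digits[100])]:
--         if number >= divisor:
--             quotient, remainder = divmod(number, divisor)
--             return (dec2geez(quotient) if quotient > 1 else "") + symbol + (dec2geez(remainder) if remainder else "")
--
--     return ""
-- ===== SOURCE B (Python) =====
-- digits = {
--     0: "", 1: "፩", 2: "፪", 3: "፫", 4: "፬", 5: "፭",
--     6: "፮", 7: "፯", 8: "፰", 9: "፱", 10: "፲",
--     20: "፳", 30: "፴", 40: "፵", 50: "፶",
--     60: "፷", 70: "፸", 80: "፹", 90: "፺",
--     100: "፻", 10000: "፼"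
-- }
--
-- def _small(n):
--     if n < 10:
--         return digits[n]
--     if n < 100:
--         t, o = divmod(n, 10)
--         return digits[t * 10] + digits[o]
--     q, r = divmod(n, 100)
--     return (_small(q) if q > 1 else "") + digits[100] + (_small(r) if r else "")
--
-- def dec2geez(number):
--     if number < 10000:
--         return _small(number)
--     groups = []
--     n = number
--     while n:
--         n, d = divmod(n, 10000)
--         groups.append(d)
--     groups.reverse()
--     res = _small(groups[0]) if groups[0] > 1 else ""
--     for d in groups[1:]:
--         res += digits[10000] + (_small(d) if d else "")
--     return res
-- ===== Notes on version B (the rewrite author's own statement) =====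
-- stated objective: alternative
-- what changed: B replaces A's single unified recursion over [10000,100] divisors by an explicit base-10000 group list built with a divmod loop plus a small(<10000) helper, then renders the groups in one left-to-right pass.
import Mathlib
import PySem

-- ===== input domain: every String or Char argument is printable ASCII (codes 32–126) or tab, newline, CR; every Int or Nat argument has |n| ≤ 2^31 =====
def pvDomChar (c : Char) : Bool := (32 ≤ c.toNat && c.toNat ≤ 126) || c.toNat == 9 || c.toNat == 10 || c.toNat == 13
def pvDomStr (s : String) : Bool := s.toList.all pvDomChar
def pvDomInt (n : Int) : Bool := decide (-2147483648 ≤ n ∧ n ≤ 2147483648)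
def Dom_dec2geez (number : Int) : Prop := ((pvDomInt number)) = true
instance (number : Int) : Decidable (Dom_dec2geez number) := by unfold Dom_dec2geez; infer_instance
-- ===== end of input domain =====

-- B replaces A's unified recursion by a base-10000 group list plus a small(<10000) helper and one
-- left-to-right pass over the groups (objective: alternative decomposition, same cost).
-- Pre_ excludes negative inputs, on which both Pythons raise KeyError.
-- The recursions are written with a fuel parameter (fuel = |n|+1 always suffices) purely as a
-- structural-termination guard; it never changes any value the Python computes.

-- ===== PORT A =====
-- the module-level `digits` dict (lookups in the ports use getD "" — on Pre_ every lookup hits a key)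
def geezDigits : PySem.Dict Int String :=
  PySem.Dict.ofList [(0, ""), (1, "፩"), (2, "፪"), (3, "፫"), (4, "፬"), (5, "፭"),
    (6, "፮"), (7, "፯"), (8, "፰"), (9, "፱"), (10, "፲"),
    (20, "፳"), (30, "፴"), (40, "፵"), (50, "፶"),
    (60, "፷"), (70, "፸"), (80, "፹"), (90, "፺"),
    (100, "፻"), (10000, "፼")]

def dec2geezGo : Nat → Int → String
  | 0, _ => ""  -- fuel exhausted; unreachable for fuel > |number|
  | fuel + 1, number =>
    if number < 10 then geezDigits.getD number ""
    else if number < 100 then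
      let tens := PySem.Int.floordiv number 10
      let ones := PySem.Int.mod number 10
      geezDigits.getD (tens * 10) "" ++ geezDigits.getD ones ""
    else if number ≥ 10000 then
      -- first iteration of the for-loop: divisor 10000
      let quotient := PySem.Int.floordiv number 10000
      let remainder := PySem.Int.mod number 10000
      (if quotient > 1 then dec2geezGo fuel quotient else "") ++ geezDigits.getD 10000 "" ++
        (if remainder ≠ 0 then dec2geezGo fuel remainder else "")
    else if number ≥ 100 then
      -- second iteration of the for-loop: divisor 100
      let quotient := PySem.Int.floordiv number 100
      let remainder := PySem.Int.mod number 100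
      (if quotient > 1 then dec2geezGo fuel quotient else "") ++ geezDigits.getD 100 "" ++
        (if remainder ≠ 0 then dec2geezGo fuel remainder else "")
    else ""

def dec2geez (number : Int) : String := dec2geezGo (number.toNat + 1) number

-- ===== PORT B =====
def geezSmallGo : Nat → Int → String
  | 0, _ => ""  -- fuel exhausted; unreachable for fuel > |n|
  | fuel + 1, n =>
    if n < 10 then geezDigits.getD n ""
    else if n < 100 then
      let t := PySem.Int.floordiv n 10
      let o := PySem.Int.mod n 10
      geezDigits.getD (t * 10) "" ++ geezDigits.getD o ""
    else
      let q := PySem.Int.floordiv n 100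
      let r := PySem.Int.mod n 100
      (if q > 1 then geezSmallGo fuel q else "") ++ geezDigits.getD 100 "" ++
        (if r ≠ 0 then geezSmallGo fuel r else "")

def geezSmall (n : Int) : String := geezSmallGo (n.toNat + 1) n

-- the `while n:` loop, collecting the base-10000 digits low-to-high (B only runs it on positive n)
def geezGroupsRevGo : Nat → Int → List Int
  | 0, _ => []  -- fuel exhausted; unreachable for fuel > |n|
  | fuel + 1, n =>
    if n ≤ 0 then []
    else PySem.Int.mod n 10000 :: geezGroupsRevGo fuel (PySem.Int.floordiv n 10000)

def geezGroupsRev (n : Int) : List Int := geezGroupsRevGo (n.toNat + 1) n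

-- `res = small(groups[0]) if groups[0] > 1 else ""` then the for-loop over groups[1:]
def geezRender : List Int → String
  | [] => ""
  | g0 :: rest =>
    rest.foldl (fun res d => res ++ (geezDigits.getD 10000 "" ++ (if d ≠ 0 then geezSmall d else "")))
      (if g0 > 1 then geezSmall g0 else "")

def dec2geez_alt (number : Int) : String :=
  if number < 10000 then geezSmall number
  else geezRender ((geezGroupsRev number).reverse)

-- ===== PRECONDITION & SPEC =====
-- Pre_ excludes negative numbers: there both A and B raise KeyError (digits[number] with number < 0).
def Pre_dec2geez (number : Int) : Prop := 0 ≤ number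
instance (number : Int) : Decidable (Pre_dec2geez number) := by unfold Pre_dec2geez; infer_instance
def pvWitness_dec2geez : Int := (123456789)

def Spec_dec2geez (number : Int) (out : String) : Prop := out = dec2geez_alt number
instance (number : Int) (out : String) : Decidable (Spec_dec2geez number out) := by unfold Spec_dec2geez; infer_instance

-- ===== CLAIM (what is proved, stated in full; the proofs are below) =====
def Claim_equal_dec2geez : Prop := ∀ (number : Int), Dom_dec2geez number → Pre_dec2geez number → Spec_dec2geez number (dec2geez number)

-- ===== LEMMAS AND PROOFS =====

-- any sufficient fuel gives the same value
theorem geezSmallGo_irrel : ∀ (f g : Nat) (n : Int), n.toNat < f → n.toNat < g →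
    geezSmallGo f n = geezSmallGo g n := by
  intro f
  induction f with
  | zero => omega
  | succ f ih =>
    intro g n hf hg
    cases g with
    | zero => omega
    | succ g =>
      rw [geezSmallGo, geezSmallGo]
      by_cases h1 : n < 10
      · simp [h1]
      · by_cases h2 : n < 100
        · simp [h1, h2]
        · have hq : PySem.Int.floordiv n 100 = n / 100 := PySem.Int.floordiv_eq_ediv_of_pos (by omega)
          have hr : PySem.Int.mod n 100 = n % 100 := PySem.Int.mod_eq_emod_of_pos (by omega)
          have e1 : geezSmallGo f (n / 100) = geezSmallGo g (n / 100) := ih g (n / 100) (by omega) (by omega)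
          have e2 : geezSmallGo f (n % 100) = geezSmallGo g (n % 100) := ih g (n % 100) (by omega) (by omega)
          simp only [if_neg h1, if_neg h2, hq, hr, e1, e2]

theorem geezGroupsRevGo_irrel : ∀ (f g : Nat) (n : Int), n.toNat < f → n.toNat < g →
    geezGroupsRevGo f n = geezGroupsRevGo g n := by
  intro f
  induction f with
  | zero => omega
  | succ f ih =>
    intro g n hf hg
    cases g with
    | zero => omega
    | succ g =>
      rw [geezGroupsRevGo, geezGroupsRevGo]
      by_cases h0 : n ≤ 0
      · simp [h0]
      · have hq : PySem.Int.floordiv n 10000 = n / 10000 := PySem.Int.floordiv_eq_ediv_of_pos (by omega)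
        have e : geezGroupsRevGo f (n / 10000) = geezGroupsRevGo g (n / 10000) :=
          ih g (n / 10000) (by omega) (by omega)
        simp only [if_neg h0, hq, e]

-- on 0 ≤ n < 10000, A's recursion computes exactly B's small helper (same fuel on both sides)
theorem dec2geezGo_small : ∀ (f : Nat) (n : Int), 0 ≤ n → n < 10000 → n.toNat < f →
    dec2geezGo f n = geezSmallGo f n := by
  intro f
  induction f with
  | zero => omega
  | succ f ih =>
    intro n h0 h4 hf
    rw [dec2geezGo, geezSmallGo]
    by_cases h1 : n < 10
    · simp [h1]
    · by_cases h2 : n < 100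
      · simp [h1, h2]
      · have hq : PySem.Int.floordiv n 100 = n / 100 := PySem.Int.floordiv_eq_ediv_of_pos (by omega)
        have hr : PySem.Int.mod n 100 = n % 100 := PySem.Int.mod_eq_emod_of_pos (by omega)
        have e1 : dec2geezGo f (n / 100) = geezSmallGo f (n / 100) :=
          ih (n / 100) (by omega) (by omega) (by omega)
        have e2 : dec2geezGo f (n % 100) = geezSmallGo f (n % 100) :=
          ih (n % 100) (by omega) (by omega) (by omega)
        simp only [if_neg h1, if_neg h2, if_neg (show ¬ n ≥ 10000 by omega),
          if_pos (show n ≥ 100 by omega), hq, hr, e1, e2]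

theorem geezGroupsRev_pos (n : Int) (h : 0 < n) :
    geezGroupsRev n = n % 10000 :: geezGroupsRev (n / 10000) := by
  rw [geezGroupsRev, geezGroupsRev, geezGroupsRevGo]
  have hq : PySem.Int.floordiv n 10000 = n / 10000 := PySem.Int.floordiv_eq_ediv_of_pos (by omega)
  have hr : PySem.Int.mod n 10000 = n % 10000 := PySem.Int.mod_eq_emod_of_pos (by omega)
  rw [if_neg (show ¬ n ≤ 0 by omega), hq, hr,
    geezGroupsRevGo_irrel n.toNat ((n / 10000).toNat + 1) (n / 10000) (by omega) (by omega)]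

theorem geezRender_append (l : List Int) (r : Int) (h : l ≠ []) :
    geezRender (l ++ [r]) =
      geezRender l ++ (geezDigits.getD 10000 "" ++ (if r ≠ 0 then geezSmall r else "")) := by
  cases l with
  | nil => exact absurd rfl h
  | cons g0 rest =>
    simp only [List.cons_append, geezRender, List.foldl_append, List.foldl_cons, List.foldl_nil]

theorem dec2geezGo_eq_alt : ∀ (f : Nat) (n : Int), 0 ≤ n → n.toNat < f →
    dec2geezGo f n = dec2geez_alt n := by
  intro f
  induction f with
  | zero => omega
  | succ f ih =>
    intro n h0 hf
    by_cases hs : n < 10000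
    · rw [dec2geez_alt, if_pos hs, geezSmall,
        dec2geezGo_small (f + 1) n h0 hs hf,
        geezSmallGo_irrel (f + 1) (n.toNat + 1) n hf (by omega)]
    · have hq : PySem.Int.floordiv n 10000 = n / 10000 := PySem.Int.floordiv_eq_ediv_of_pos (by omega)
      have hr : PySem.Int.mod n 10000 = n % 10000 := PySem.Int.mod_eq_emod_of_pos (by omega)
      have hq1 : 1 ≤ n / 10000 := by omega
      have hrb : 0 ≤ n % 10000 ∧ n % 10000 < 10000 := by constructor <;> omega
      -- A's value at n
      have hA : dec2geezGo (f + 1) n =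
          (if n / 10000 > 1 then dec2geezGo f (n / 10000) else "") ++ geezDigits.getD 10000 "" ++
            (if n % 10000 ≠ 0 then geezSmall (n % 10000) else "") := by
        rw [dec2geezGo]
        simp only [if_neg (show ¬ n < 10 by omega), if_neg (show ¬ n < 100 by omega),
          if_pos (show n ≥ 10000 by omega), hq, hr]
        by_cases hz : n % 10000 ≠ 0
        · rw [if_pos hz, if_pos hz, dec2geezGo_small f (n % 10000) hrb.1 hrb.2 (by omega),
            geezSmall, geezSmallGo_irrel f ((n % 10000).toNat + 1) (n % 10000) (by omega) (by omega)]
        · rw [if_neg hz, if_neg hz]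
      -- B's value at n
      have hgs : (geezGroupsRev n).reverse = (geezGroupsRev (n / 10000)).reverse ++ [n % 10000] := by
        rw [geezGroupsRev_pos n (by omega), List.reverse_cons]
      have hne : (geezGroupsRev (n / 10000)).reverse ≠ [] := by
        rw [geezGroupsRev_pos (n / 10000) (by omega)]
        simp
      have hB : dec2geez_alt n =
          geezRender ((geezGroupsRev (n / 10000)).reverse) ++
            (geezDigits.getD 10000 "" ++ (if n % 10000 ≠ 0 then geezSmall (n % 10000) else "")) := by
        rw [dec2geez_alt, if_neg hs, hgs, geezRender_append _ _ hne]
      rw [hA, hB, String.append_assoc]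
      congr 1
      -- head part: A's (if q > 1 then dec2geez q else "") = geezRender (groups of q, reversed)
      by_cases hq4 : n / 10000 < 10000
      · -- q fits in one group: the reversed group list is [q]
        have hgq : (geezGroupsRev (n / 10000)).reverse = [n / 10000] := by
          rw [geezGroupsRev_pos (n / 10000) (by omega)]
          have hqq : n / 10000 / 10000 = 0 := by omega
          have hqr : n / 10000 % 10000 = n / 10000 := by omega
          rw [hqq, hqr, geezGroupsRev, geezGroupsRevGo, if_pos (by omega : (0:Int) ≤ 0)]
          simp
        rw [hgq]
        simp only [geezRender, List.foldl_nil]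
        by_cases hgt : n / 10000 > 1
        · rw [if_pos hgt, if_pos hgt, dec2geezGo_small f (n / 10000) (by omega) hq4 (by omega),
            geezSmall, geezSmallGo_irrel f ((n / 10000).toNat + 1) (n / 10000) (by omega) (by omega)]
        · rw [if_neg hgt, if_neg hgt]
      · -- q itself spans several groups: recurse
        have hgt : n / 10000 > 1 := by omega
        rw [if_pos hgt, ih (n / 10000) (by omega) (by omega), dec2geez_alt, if_neg hq4]

-- ===== VERDICT (by name: the statement is the Claim_ definition above) =====
theorem dec2geez_spec : Claim_equal_dec2geez := by
  intro n _ hpre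
  exact dec2geezGo_eq_alt (n.toNat + 1) n hpre (by omega)
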